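-- pv_equiv track=rewrite | github.com/lordzizzy/leet_code | 04_daily_challenge/2021/02-feb/week4/divide_two_ints.py | divide_sub_loop
-- ===== SOURCE A (Python) =====
-- def divide_sub_loop(dividend: int, divisor: int) -> int:
--     # handle overflow case for -2³¹ / 1
--     if dividend == -2147483648 and divisor == -1:
--         return 2147483647
--
--     dv = int(abs(dividend))
--     ds = int(abs(divisor))
--     sign = -1 if (dividend > 0) ^ (divisor > 0) else 1
--     res = 0
--
--     for x in reversed(range(32)):
--         if (dv >> x) - ds >= 0:
--             res += 1 << x
--             dv -= ds << x
--
--     return res * sign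
-- ===== SOURCE B (Python) =====
-- def divide_sub_loop(dividend: int, divisor: int) -> int:
--     # handle overflow case for -2^31 / -1
--     if dividend == -2147483648 and divisor == -1:
--         return 2147483647
--
--     dv = abs(dividend)
--     ds = abs(divisor)
--     sign = -1 if (dividend > 0) ^ (divisor > 0) else 1
--     res = 0
--
--     # bottom-up doubling: subtract the largest shifted divisor each round
--     while dv >= ds:
--         temp, m = ds, 1
--         while (temp << 1) <= dv:
--             temp <<= 1
--             m <<= 1
--         dv -= temp
--         res += m
--
--     return res * sign
-- ===== Notes on version B (the rewrite author's own statement) =====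
-- stated objective: alternative
-- what changed: Replaces the fixed 32-iteration top-down scan over bit positions with a bottom-up repeated-doubling loop that subtracts the largest doubled divisor each round, running only as many rounds as the quotient has set bits.
-- outside the precondition, e.g. on divide_sub_loop(5, 0): A returns -4294967295, B does not finish within the time limit
import Mathlib
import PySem

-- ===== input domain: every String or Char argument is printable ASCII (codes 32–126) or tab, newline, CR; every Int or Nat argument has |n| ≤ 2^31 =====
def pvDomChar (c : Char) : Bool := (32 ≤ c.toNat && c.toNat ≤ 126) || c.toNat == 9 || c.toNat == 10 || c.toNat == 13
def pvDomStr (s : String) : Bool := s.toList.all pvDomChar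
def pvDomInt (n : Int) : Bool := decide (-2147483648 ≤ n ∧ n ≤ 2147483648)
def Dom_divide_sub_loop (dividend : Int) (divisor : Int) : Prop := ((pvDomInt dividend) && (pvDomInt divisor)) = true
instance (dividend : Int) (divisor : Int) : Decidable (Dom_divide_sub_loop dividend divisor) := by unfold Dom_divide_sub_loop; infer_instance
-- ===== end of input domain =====

-- B replaces A's fixed 32-iteration top-down bit scan with a bottom-up repeated-doubling
-- subtraction loop (alternative decomposition; return value only, no mutation involved).

-- ===== PORT A =====
-- loop body of 'for x in reversed(range(32))' over state (dv, res); dv >> x is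
-- PySem.Int.floordiv dv 2^x (exact: dv ≥ 0 here), ds << x is ds * 2^x, 1 << x is 2^x.
def aStep (ds : Int) (st : Int × Int) (x : Nat) : Int × Int :=
  if PySem.Int.floordiv st.1 (2 ^ x) - ds ≥ 0 then (st.1 - ds * 2 ^ x, st.2 + 2 ^ x)
  else st

def divide_sub_loop (dividend : Int) (divisor : Int) : Int :=
  if dividend = -2147483648 ∧ divisor = -1 then 2147483647
  else
    let dv : Int := |dividend|
    let ds : Int := |divisor|
    let sign : Int := if (decide (dividend > 0)).xor (decide (divisor > 0)) then -1 else 1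
    let st := ((List.range 32).reverse).foldl (aStep ds) (dv, 0)
    st.2 * sign

-- ===== PORT B =====
-- inner 'while (temp << 1) <= dv' loop; fuel only makes the recursion total
def bInner (dv : Int) : Nat → Int × Int → Int × Int
  | 0, tm => tm
  | fuel + 1, (temp, m) =>
    if temp * 2 ≤ dv then bInner dv fuel (temp * 2, m * 2) else (temp, m)

-- outer 'while dv >= ds' loop; fuel only makes the recursion total
def bOuter (ds : Int) : Nat → Int → Int → Int
  | 0, _, res => res
  | fuel + 1, dv, res =>
    if dv ≥ ds then
      let tm := bInner dv (dv.toNat + 1) (ds, 1)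
      bOuter ds fuel (dv - tm.1) (res + tm.2)
    else res

def divide_sub_loop_alt (dividend : Int) (divisor : Int) : Int :=
  if dividend = -2147483648 ∧ divisor = -1 then 2147483647
  else
    let dv : Int := |dividend|
    let ds : Int := |divisor|
    let sign : Int := if (decide (dividend > 0)).xor (decide (divisor > 0)) then -1 else 1
    bOuter ds (dv.toNat + 1) dv 0 * sign

-- ===== PRECONDITION & SPEC =====
-- Pre_ excludes divisor = 0: there Python A returns the accidental value ±4294967295
-- (every bit test (dv >> x) - 0 >= 0 succeeds) while B's subtraction loop diverges.
def Pre_divide_sub_loop (dividend : Int) (divisor : Int) : Prop := divisor ≠ 0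
instance (dividend : Int) (divisor : Int) : Decidable (Pre_divide_sub_loop dividend divisor) := by unfold Pre_divide_sub_loop; infer_instance
def pvWitness_divide_sub_loop : Int × Int := (7, -2)

def Spec_divide_sub_loop (dividend : Int) (divisor : Int) (out : Int) : Prop := out = divide_sub_loop_alt dividend divisor
instance (dividend : Int) (divisor : Int) (out : Int) : Decidable (Spec_divide_sub_loop dividend divisor out) := by unfold Spec_divide_sub_loop; infer_instance

-- ===== CLAIM (what is proved, stated in full; the proofs are below) =====
def Claim_equal_divide_sub_loop : Prop := ∀ (dividend : Int) (divisor : Int), Dom_divide_sub_loop dividend divisor → Pre_divide_sub_loop dividend divisor → Spec_divide_sub_loop dividend divisor (divide_sub_loop dividend divisor)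

-- ===== LEMMAS AND PROOFS =====

-- A's loop over bits k-1 … 0 adds ⌊dv/ds⌋ to res and leaves dv mod ds, provided dv < ds·2^k.
theorem aLoop_eq (ds : Int) (hds : 1 ≤ ds) :
    ∀ (k : Nat) (dv res : Int), 0 ≤ dv → dv < ds * 2 ^ k →
      ((List.range k).reverse).foldl (aStep ds) (dv, res) = (dv % ds, res + dv / ds) := by
  intro k
  induction k with
  | zero =>
    intro dv res h0 hlt
    simp only [List.range_zero, List.reverse_nil, List.foldl_nil]
    rw [Int.emod_eq_of_lt h0 (by simpa using hlt), Int.ediv_eq_zero_of_lt h0 (by simpa using hlt)]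
    simp
  | succ k ih =>
    intro dv res h0 hlt
    have hpow : (0 : Int) < 2 ^ k := by positivity
    rw [List.range_succ, List.reverse_append, List.reverse_singleton, List.singleton_append,
      List.foldl_cons]
    have hcond : (PySem.Int.floordiv dv (2 ^ k) - ds ≥ 0) ↔ ds * 2 ^ k ≤ dv := by
      rw [PySem.Int.floordiv_eq_ediv_of_pos hpow, ge_iff_le, sub_nonneg,
        Int.le_ediv_iff_mul_le hpow]
    by_cases hc : ds * 2 ^ k ≤ dv
    · have hc' : PySem.Int.floordiv dv (2 ^ k) - ds ≥ 0 := hcond.mpr hc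
      have : aStep ds (dv, res) k = (dv - ds * 2 ^ k, res + 2 ^ k) := by
        simp only [aStep]; rw [if_pos hc']
      rw [this, ih (dv - ds * 2 ^ k) (res + 2 ^ k) (by omega)
        (by have : ds * 2 ^ (k + 1) = ds * 2 ^ k + ds * 2 ^ k := by ring
            omega)]
      have hmod : (dv - ds * 2 ^ k) % ds = dv % ds := by
        have : dv - ds * 2 ^ k = dv - 2 ^ k * ds := by ring
        rw [this, Int.sub_mul_emod_self_right]
      have hdiv : (dv - ds * 2 ^ k) / ds = dv / ds - 2 ^ k := by
        have h1 : dv - ds * 2 ^ k + 2 ^ k * ds = dv := by ring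
        have := Int.add_mul_ediv_right (dv - ds * 2 ^ k) (2 ^ k) (by omega : ds ≠ 0)
        rw [h1] at this
        omega
      rw [hmod, hdiv]
      ring_nf
    · have hc' : ¬(PySem.Int.floordiv dv (2 ^ k) - ds ≥ 0) := fun h => hc (hcond.mp h)
      have : aStep ds (dv, res) k = (dv, res) := by
        simp only [aStep]; rw [if_neg hc']
      rw [this, ih dv res h0 (by omega)]

-- B's inner doubling loop: from (ds·m, m) with ds·m ≤ dv it returns (ds·M, M) with
-- ds·M ≤ dv < 2·ds·M, given enough fuel.
theorem bInner_eq (dv ds : Int) :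
    ∀ (fuel : Nat) (m : Int), 0 < m → ds * m ≤ dv → dv < ds * m * 2 ^ fuel →
      ∃ M : Int, bInner dv fuel (ds * m, m) = (ds * M, M) ∧ 0 < M ∧
        ds * M ≤ dv ∧ dv < ds * M * 2 := by
  intro fuel
  induction fuel with
  | zero =>
    intro m hm hle hlt
    simp only [pow_zero, mul_one] at hlt
    omega
  | succ fuel ih =>
    intro m hm hle hlt
    simp only [bInner]
    by_cases hc : ds * m * 2 ≤ dv
    · rw [if_pos hc]
      have h2 : ds * m * 2 = ds * (m * 2) := by ring
      rw [h2] at hc ⊢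
      obtain ⟨M, hM⟩ := ih (m * 2) (by omega) hc
        (by have : ds * (m * 2) * 2 ^ fuel = ds * m * 2 ^ (fuel + 1) := by ring
            omega)
      exact ⟨M, hM⟩
    · rw [if_neg hc]
      exact ⟨m, rfl, hm, hle, by omega⟩

-- B's outer loop computes res + ⌊dv/ds⌋ with fuel > dv.
theorem bOuter_eq (ds : Int) (hds : 1 ≤ ds) :
    ∀ (fuel : Nat) (dv res : Int), 0 ≤ dv → dv < fuel →
      bOuter ds fuel dv res = res + dv / ds := by
  intro fuel
  induction fuel with
  | zero => intro dv res h0 hlt; simp at hlt; omega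
  | succ fuel ih =>
    intro dv res h0 hlt
    simp only [bOuter]
    by_cases hc : dv ≥ ds
    · rw [if_pos hc]
      have hfuelbig : dv < ds * 1 * 2 ^ (dv.toNat + 1) := by
        have h1 : dv.toNat < 2 ^ dv.toNat := Nat.lt_two_pow_self
        have h2 : (dv.toNat : Int) < (2 : Int) ^ dv.toNat := by exact_mod_cast h1
        have h3 : (dv.toNat : Int) = dv := Int.toNat_of_nonneg h0
        have h4 : (2 : Int) ^ dv.toNat ≤ 2 ^ (dv.toNat + 1) := by
          have : (0:Int) < 2 ^ dv.toNat := by positivity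
          rw [pow_succ]; omega
        nlinarith [pow_pos (by norm_num : (0:Int) < 2) (dv.toNat + 1)]
      obtain ⟨M, hEq, hMpos, hMle, hMlt⟩ :=
        bInner_eq dv ds (dv.toNat + 1) 1 (by omega) (by omega) hfuelbig
      rw [mul_one] at hEq
      rw [hEq]
      have hdsM : 1 ≤ ds * M := by nlinarith
      rw [ih (dv - ds * M) (res + M) (by omega) (by omega)]
      have hdiv : (dv - ds * M) / ds = dv / ds - M := by
        have h1 : dv - ds * M + M * ds = dv := by ring
        have := Int.add_mul_ediv_right (dv - ds * M) M (by omega : ds ≠ 0)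
        rw [h1] at this
        omega
      rw [hdiv]
      ring
    · rw [if_neg hc]
      rw [Int.ediv_eq_zero_of_lt h0 (by omega)]
      omega

-- ===== VERDICT (by name: the statement is the Claim_ definition above) =====
theorem divide_sub_loop_spec : Claim_equal_divide_sub_loop := by
  intro dividend divisor hdom hpre
  unfold Spec_divide_sub_loop divide_sub_loop divide_sub_loop_alt
  by_cases hg : dividend = -2147483648 ∧ divisor = -1
  · rw [if_pos hg, if_pos hg]
  · rw [if_neg hg, if_neg hg]
    have hds : (1 : Int) ≤ |divisor| := by
      have hne : divisor ≠ 0 := hpre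
      have := abs_pos.mpr hne
      omega
    have hdv0 : (0 : Int) ≤ |dividend| := abs_nonneg _
    have hdvsmall : |dividend| ≤ 2147483648 := by
      simp only [Dom_divide_sub_loop, pvDomInt, Bool.and_eq_true, decide_eq_true_eq] at hdom
      rcases abs_cases dividend with ⟨h1, h2⟩ | ⟨h1, h2⟩ <;> omega
    have hbound : |dividend| < |divisor| * 2 ^ 32 := by
      have h1 : (2 : Int) ^ 32 = 4294967296 := by norm_num
      nlinarith
    dsimp only
    rw [aLoop_eq |divisor| hds 32 |dividend| 0 hdv0 hbound,
      bOuter_eq |divisor| hds (|dividend|.toNat + 1) |dividend| 0 hdv0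
        (by have := Int.toNat_of_nonneg hdv0; omega)]
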